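-- pv_equiv track=rewrite | github.com/PetarMilojevic13/LeetCode-problems | Rearrange Characters to Make Target String 2287.py | rearrangeCharacters
-- ===== SOURCE A (Python) =====
-- from collections import defaultdict
--
-- def rearrangeCharacters(s, target):
--     """
--     :type s: str
--     :type target: str
--     :rtype: int
--     """
--     hash = defaultdict(int)
--     for letter in s:
--         hash[letter]+=1
--     res = 0
--     while True:
--         end = False
--         for letter in target:
--             if hash[letter]>0:
--                 hash[letter]-=1
--             else:
--                 end=True
--                 break
--         if end:
--             break
--         res+=1
--     return res
-- ===== SOURCE B (Python) =====
-- def rearrangeCharacters(s, target):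
--     # limiting-ratio closed form: copies = min over distinct target letters
--     # of (occurrences in s) // (occurrences in target)
--     return min(s.count(c) // target.count(c) for c in set(target))
-- ===== Notes on version B (the rewrite author's own statement) =====
-- stated objective: simpler
-- what changed: Replaces A's repeated full-pass copy-subtraction simulation over a mutable frequency dict with a closed-form min of per-letter count ratios s.count(c)//target.count(c) over the distinct letters of target (C-level counting, no per-copy loop).
import Mathlib
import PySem

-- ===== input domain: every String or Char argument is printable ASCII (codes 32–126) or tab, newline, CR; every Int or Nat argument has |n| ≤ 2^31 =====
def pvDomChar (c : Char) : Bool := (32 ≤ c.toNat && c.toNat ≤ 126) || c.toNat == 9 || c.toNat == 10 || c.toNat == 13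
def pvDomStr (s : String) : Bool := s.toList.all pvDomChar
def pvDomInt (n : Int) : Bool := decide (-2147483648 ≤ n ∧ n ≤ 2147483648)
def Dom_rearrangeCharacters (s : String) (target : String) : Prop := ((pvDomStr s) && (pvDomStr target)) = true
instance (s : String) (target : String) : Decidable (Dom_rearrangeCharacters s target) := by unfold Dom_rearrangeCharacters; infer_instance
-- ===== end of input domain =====

-- B replaces A's copy-by-copy subtraction simulation with the closed-form min of
-- per-letter count ratios (objective: simpler).

-- ===== PORT A =====
-- inner 'for letter in target' pass: subtract one copy, or set end=True at the first short letter
def pvPassA (h : PySem.Dict Char Int) : List Char → PySem.Dict Char Int × Bool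
  | [] => (h, false)
  | c :: rest =>
    if h.getD c 0 > 0 then pvPassA (h.insert c (h.getD c 0 - 1)) rest
    else (h, true)

-- the 'while True' loop; the fuel is a totality guard only (inside Pre_, |s|+1 passes always suffice)
def pvLoopA (target : List Char) : PySem.Dict Char Int → Int → Nat → Int
  | _, res, 0 => res
  | h, res, fuel+1 =>
    let p := pvPassA h target
    if p.2 then res else pvLoopA target p.1 (res + 1) fuel

def rearrangeCharacters (s : String) (target : String) : Int :=
  -- the first loop builds hash = frequency dict of s; then the while-loop runs
  pvLoopA target.toList
    (s.toList.foldl (fun d c => d.insert c (d.getD c 0 + 1)) PySem.Dict.empty)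
    0 (s.toList.length + 1)

-- ===== PORT B =====
def rearrangeCharacters_alt (s : String) (target : String) : Int :=
  -- str.count of a single character = List.count on .toList (exact);
  -- min over a set comprehension: the value is independent of set iteration order;
  -- '.getD 0' is the total form of min (Pre_ excludes target = "", where Python's min raises ValueError)
  (PySem.List.min?
    ((PySem.Set.ofList target.toList).map
      (fun c => PySem.Int.floordiv (s.toList.count c : Int) (target.toList.count c : Int)))
    (fun x => x)).getD 0

-- ===== PRECONDITION & SPEC =====
-- Pre_ excludes only target = "", where A loops forever (no return) and B raises ValueError.
def Pre_rearrangeCharacters (s : String) (target : String) : Prop := target.toList ≠ []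
instance (s : String) (target : String) : Decidable (Pre_rearrangeCharacters s target) := by
  unfold Pre_rearrangeCharacters; infer_instance

def pvWitness_rearrangeCharacters : String × String := ("anagram", "nag")

def Spec_rearrangeCharacters (s : String) (target : String) (out : Int) : Prop := out = rearrangeCharacters_alt s target
instance (s : String) (target : String) (out : Int) : Decidable (Spec_rearrangeCharacters s target out) := by unfold Spec_rearrangeCharacters; infer_instance

-- ===== CLAIM (what is proved, stated in full; the proofs are below) =====
def Claim_equal_rearrangeCharacters : Prop := ∀ (s : String) (target : String), Dom_rearrangeCharacters s target → Pre_rearrangeCharacters s target → Spec_rearrangeCharacters s target (rearrangeCharacters s target)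

-- ===== LEMMAS AND PROOFS =====

-- one pass succeeds iff the dict holds at least target's count of every letter of target
theorem pvPassA_snd_false_iff (t : List Char) : ∀ (h : PySem.Dict Char Int),
    ((pvPassA h t).2 = false ↔ ∀ c ∈ t, (t.count c : Int) ≤ h.getD c 0) := by
  induction t with
  | nil => intro h; simp [pvPassA]
  | cons c rest ih =>
    intro h
    have hcd : ∀ d : Char, d ≠ c → List.count d (c :: rest) = List.count d rest := by
      intro d hdc
      simp [List.count_cons]
      exact fun h => hdc h.symm
    have hcc : List.count c (c :: rest) = List.count c rest + 1 := by
      simp [List.count_cons]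
    by_cases hpos : h.getD c 0 > 0
    · rw [pvPassA, if_pos hpos, ih]
      constructor
      · intro hall d hd
        rcases List.mem_cons.mp hd with rfl | hdm
        · by_cases hcr : d ∈ rest
          · have h1 := hall d hcr
            rw [PySem.Dict.getD_insert, if_pos rfl] at h1
            omega
          · have h0 : List.count d rest = 0 := List.count_eq_zero_of_not_mem hcr
            omega
        · by_cases hdc : d = c
          · subst hdc
            have h1 := hall d hdm
            rw [PySem.Dict.getD_insert, if_pos rfl] at h1
            omega
          · have h1 := hall d hdm
            rw [PySem.Dict.getD_insert, if_neg hdc] at h1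
            have h2 := hcd d hdc
            omega
      · intro hall d hd
        rw [PySem.Dict.getD_insert]
        by_cases hdc : d = c
        · subst hdc
          rw [if_pos rfl]
          have h1 := hall d List.mem_cons_self
          omega
        · rw [if_neg hdc]
          have h1 := hall d (List.mem_cons_of_mem _ hd)
          have h2 := hcd d hdc
          omega
    · rw [pvPassA, if_neg hpos]
      simp only [Bool.true_eq_false, false_iff]
      intro hall
      have h1 := hall c List.mem_cons_self
      have hc1 : 1 ≤ (c :: rest).count c := List.count_pos_iff.mpr List.mem_cons_self
      omega

-- on success the pass subtracted target's count of every letter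
theorem pvPassA_fst (t : List Char) : ∀ (h : PySem.Dict Char Int),
    (pvPassA h t).2 = false →
    ∀ c, (pvPassA h t).1.getD c 0 = h.getD c 0 - (t.count c : Int) := by
  induction t with
  | nil => intro h _ c; simp [pvPassA]
  | cons c rest ih =>
    intro h hsucc d
    by_cases hpos : h.getD c 0 > 0
    · rw [pvPassA, if_pos hpos] at hsucc ⊢
      rw [ih _ hsucc d, PySem.Dict.getD_insert]
      by_cases hdc : d = c
      · subst hdc
        rw [if_pos rfl]
        have hcc : List.count d (d :: rest) = List.count d rest + 1 := by
          simp [List.count_cons]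
        omega
      · rw [if_neg hdc]
        have h2 : List.count d (c :: rest) = List.count d rest := by
          simp [List.count_cons]
          exact fun h => hdc h.symm
        rw [h2]
    · rw [pvPassA, if_neg hpos] at hsucc
      simp at hsucc

-- the loop returns v, the min ratio, from any state reached after `res` successful passes
theorem pvLoopA_eq (tgt : List Char) (S : Char → Int) (v : Int)
    (hv1 : ∀ c ∈ tgt, v ≤ PySem.Int.floordiv (S c) (tgt.count c))
    (hv2 : ∃ c ∈ tgt, PySem.Int.floordiv (S c) (tgt.count c) = v) :
    ∀ (fuel : Nat) (h : PySem.Dict Char Int) (res : Int),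
    (∀ c, h.getD c 0 = S c - res * (tgt.count c : Int)) →
    res ≤ v → (v - res).toNat < fuel →
    pvLoopA tgt h res fuel = v := by
  intro fuel
  induction fuel with
  | zero => intro h res _ _ hf; omega
  | succ n ih =>
    intro h res hinv hle hf
    have hTpos : ∀ c ∈ tgt, (0 : Int) < (tgt.count c : Int) := by
      intro c hc
      have := List.count_pos_iff.mpr hc
      exact_mod_cast this
    have hsucc_iff : (pvPassA h tgt).2 = false ↔ res + 1 ≤ v := by
      rw [pvPassA_snd_false_iff]
      constructor
      · intro hall
        obtain ⟨c₀, hc₀, hfv⟩ := hv2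
        have h1 := hall c₀ hc₀
        rw [hinv c₀] at h1
        rw [← hfv, PySem.Int.le_floordiv_iff_mul_le (hTpos c₀ hc₀)]
        nlinarith [hTpos c₀ hc₀]
      · intro hv c hc
        have h1 : res + 1 ≤ PySem.Int.floordiv (S c) (tgt.count c) :=
          le_trans hv (hv1 c hc)
        rw [PySem.Int.le_floordiv_iff_mul_le (hTpos c hc)] at h1
        rw [hinv c]; nlinarith [hTpos c hc]
    rw [pvLoopA]
    by_cases hres : res + 1 ≤ v
    · have hs : (pvPassA h tgt).2 = false := hsucc_iff.mpr hres
      rw [hs]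
      simp only [Bool.false_eq_true, if_false]
      apply ih _ _ _ hres (by omega)
      intro c
      rw [pvPassA_fst tgt h hs c, hinv c]; ring
    · have hveq : v = res := by omega
      have hs : (pvPassA h tgt).2 = true := by
        by_contra hne
        have := hsucc_iff.mp (by simpa using hne)
        omega
      rw [hs]; simp [hveq]

-- ===== VERDICT (by name: the statement is the Claim_ definition above) =====
theorem rearrangeCharacters_spec : Claim_equal_rearrangeCharacters := by
  intro s target _ hpre
  unfold Spec_rearrangeCharacters rearrangeCharacters rearrangeCharacters_alt
  set tgt := target.toList with htgt
  set S : Char → Int := fun c => (s.toList.count c : Int) with hS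
  set vals := (PySem.Set.ofList tgt).map (fun c => PySem.Int.floordiv (S c) (tgt.count c)) with hvals
  have hinit : ∀ c, (s.toList.foldl (fun d c => d.insert c (d.getD c 0 + 1)) PySem.Dict.empty).getD c 0 = S c := by
    intro c
    rw [PySem.Dict.getD_foldl_insert_add_one, PySem.Dict.getD_empty]
    simp [hS]
  have hvne : vals ≠ [] := by
    obtain ⟨c, hc⟩ := List.exists_mem_of_ne_nil tgt hpre
    have hmem : c ∈ PySem.Set.ofList tgt := (PySem.Set.mem_ofList tgt c).mpr hc
    intro habs
    rw [hvals] at habs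
    have h0 := List.map_eq_nil_iff.mp habs
    rw [h0] at hmem; simp at hmem
  obtain ⟨v, hv⟩ : ∃ v, PySem.List.min? vals (fun x => x) = some v := by
    cases hmv : PySem.List.min? vals (fun x => x) with
    | none => exact absurd ((PySem.List.min?_eq_none_iff vals _).mp hmv) hvne
    | some w => exact ⟨w, rfl⟩
  have hv1 : ∀ c ∈ tgt, v ≤ PySem.Int.floordiv (S c) (tgt.count c) := by
    intro c hc
    have hmem : PySem.Int.floordiv (S c) (tgt.count c) ∈ vals := by
      rw [hvals]
      exact List.mem_map_of_mem ((PySem.Set.mem_ofList tgt c).mpr hc)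
    exact PySem.List.min?_isMin hv _ hmem
  have hv2 : ∃ c ∈ tgt, PySem.Int.floordiv (S c) (tgt.count c) = v := by
    have hmem := PySem.List.min?_mem hv
    rw [hvals] at hmem
    obtain ⟨c, hc, hcv⟩ := List.mem_map.mp hmem
    exact ⟨c, (PySem.Set.mem_ofList tgt c).mp hc, hcv⟩
  obtain ⟨c₀, hc₀, hfv⟩ := hv2
  have hT₀ : (0 : Int) < (tgt.count c₀ : Int) := by
    exact_mod_cast List.count_pos_iff.mpr hc₀
  have hS₀ : 0 ≤ S c₀ := by simp [hS]
  have hv0 : 0 ≤ v := by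
    rw [← hfv, PySem.Int.le_floordiv_iff_mul_le hT₀]
    simpa using hS₀
  have hvle : v ≤ (s.toList.length : Int) := by
    have h1 : PySem.Int.floordiv (S c₀) (tgt.count c₀) < S c₀ + 1 := by
      rw [PySem.Int.floordiv_lt_iff_lt_mul hT₀]
      nlinarith
    have h2 : S c₀ ≤ (s.toList.length : Int) := by
      simp only [hS]; exact_mod_cast List.count_le_length
    omega
  rw [pvLoopA_eq tgt S v hv1 ⟨c₀, hc₀, hfv⟩ _ _ 0 (by simpa using hinit) hv0 (by omega), hv]
  rfl
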